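-- pv_equiv track=rewrite | github.com/maheshkrishnachalla/DATASTR-N-ALGOR | src/SlidingWindow/find_the_repeated_substring_in_string.py | find_repeated_substring
-- ===== SOURCE A (Python) =====
-- def find_repeated_substring(s):
--     n = len(s)
--     p1 = 0
--     p2 = 1
--     lon_str = ''
--     sub_str = ''
--     i = 1
--     if n==1 or n == 0:
--         return 'not repeated string'
--     while n>i:
--         if s[p1] == s[p2]:
--             sub_str = s[p1:p2+1]
--         else:
--             p1 = p2
--         p2 = p2+1
--         if len(sub_str) > len(lon_str) :
--             lon_str = sub_str
--         i +=1
--     return  lon_str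
-- ===== SOURCE B (Python) =====
-- def find_repeated_substring(s):
--     if len(s) <= 1:
--         return 'not repeated string'
--     # collect maximal runs of equal characters as (char, count) pairs
--     runs = []
--     cur, cnt = s[0], 1
--     for ch in s[1:]:
--         if ch == cur:
--             cnt += 1
--         else:
--             runs.append((cur, cnt))
--             cur, cnt = ch, 1
--     runs.append((cur, cnt))
--     best = ''
--     for ch, cnt in runs:
--         if cnt >= 2 and cnt > len(best):
--             best = ch * cnt
--     return best
-- ===== Notes on version B (the rewrite author's own statement) =====
-- stated objective: idiomatic
-- what changed: Replaces the two-pointer/slice reset scan with an explicit run-grouping pass: build the list of maximal (char, count) runs in one sweep, then pick the earliest run with count >= 2 and strictly maximal count.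
import Mathlib
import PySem

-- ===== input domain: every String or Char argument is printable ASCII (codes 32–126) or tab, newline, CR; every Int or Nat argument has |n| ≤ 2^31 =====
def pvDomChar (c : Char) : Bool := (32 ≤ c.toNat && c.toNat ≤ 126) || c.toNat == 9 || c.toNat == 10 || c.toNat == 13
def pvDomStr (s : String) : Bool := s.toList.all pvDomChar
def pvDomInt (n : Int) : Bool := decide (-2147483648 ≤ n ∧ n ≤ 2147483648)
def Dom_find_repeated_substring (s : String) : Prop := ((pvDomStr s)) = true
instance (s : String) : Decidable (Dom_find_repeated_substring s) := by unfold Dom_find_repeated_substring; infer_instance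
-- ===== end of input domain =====

-- B replaces A's two-pointer reset scan by a run-grouping pass (collect the maximal
-- (char, count) runs, then select the earliest strictly-longest run with count ≥ 2);
-- objective: idiomatic.

-- ===== PORT A =====
-- one iteration of A's while loop, for the current value of p2 (= i);
-- state is (p1, sub_str, lon_str).  Indices p1 ≤ p2 < n are always in range,
-- so List.getD is exact for Python's s[p1], s[p2] here.
def pvStepA (cs : List Char) (st : Nat × List Char × List Char) (p2 : Nat) :
    Nat × List Char × List Char :=
  let p1 := st.1
  let sub := st.2.1
  let lon := st.2.2
  -- if s[p1] == s[p2]: sub_str = s[p1:p2+1]  else: p1 = p2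
  let p1sub : Nat × List Char :=
    if cs.getD p1 ' ' = cs.getD p2 ' ' then
      (p1, PySem.List.slice cs (some (p1 : Int)) (some ((p2 : Int) + 1)))
    else (p2, sub)
  -- if len(sub_str) > len(lon_str): lon_str = sub_str
  let lon' := if lon.length < p1sub.2.length then p1sub.2 else lon
  (p1sub.1, p1sub.2, lon')

def find_repeated_substring (s : String) : String :=
  let cs := s.toList
  let n := cs.length
  if n = 1 ∨ n = 0 then "not repeated string"
  else
    -- while n > i: body; p2 and i both start at 1 and increase by 1, so p2 = i
    let st := (List.range' 1 (n - 1)).foldl (pvStepA cs) (0, ([] : List Char), ([] : List Char))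
    String.ofList st.2.2

-- ===== PORT B =====
-- first loop of Source B: fold over the tail with state (cur, cnt, runs-so-far)
def pvRunStep (st : Char × Nat × List (Char × Nat)) (ch : Char) :
    Char × Nat × List (Char × Nat) :=
  if ch = st.1 then (st.1, st.2.1 + 1, st.2.2) else (ch, 1, st.2.2 ++ [(st.1, st.2.1)])

-- second loop of Source B: best accumulator over the runs
def pvPickStep (best : List Char) (r : Char × Nat) : List Char :=
  if 2 ≤ r.2 ∧ best.length < r.2 then List.replicate r.2 r.1 else best

def find_repeated_substring_alt (s : String) : String :=
  match s.toList with
  | [] => "not repeated string"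
  | c :: t =>
    if t = [] then "not repeated string"
    else
      let st := t.foldl pvRunStep (c, 1, [])
      let runs := st.2.2 ++ [(st.1, st.2.1)]
      String.ofList (runs.foldl pvPickStep [])

-- ===== PRECONDITION & SPEC =====
def Spec_find_repeated_substring (s : String) (out : String) : Prop := out = find_repeated_substring_alt s
instance (s : String) (out : String) : Decidable (Spec_find_repeated_substring s out) := by unfold Spec_find_repeated_substring; infer_instance

-- ===== CLAIM (what is proved, stated in full; the proofs are below) =====
def Claim_equal_find_repeated_substring : Prop := ∀ (s : String), Dom_find_repeated_substring s → Spec_find_repeated_substring s (find_repeated_substring s)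

-- ===== LEMMAS AND PROOFS =====

-- the complete run list produced by B's first loop, starting from run (d,k) and
-- already-collected runs rs
def pvRunsOf (d : Char) (k : Nat) (rs : List (Char × Nat)) (t : List Char) :
    List (Char × Nat) :=
  ((t.foldl pvRunStep (d, k, rs)).2.2) ++
    [((t.foldl pvRunStep (d, k, rs)).1, (t.foldl pvRunStep (d, k, rs)).2.1)]

-- reference scan both ports are reduced to: d = current run char, k = its length
-- so far, lon = best already accounting for the current run at length k
def pvScanRef (d : Char) (k : Nat) (lon : List Char) : List Char → List Char
  | [] => lon
  | x :: t =>
    if x = d then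
      pvScanRef d (k + 1) (if lon.length < k + 1 then List.replicate (k + 1) d else lon) t
    else pvScanRef x 1 lon t

theorem pvPick_upd (d : Char) (k : Nat) (best : List Char) (hk : 1 ≤ k) :
    (if (pvPickStep best (d, k)).length < k + 1 then List.replicate (k + 1) d
      else pvPickStep best (d, k)) = pvPickStep best (d, k + 1) := by
  simp only [pvPickStep]
  split_ifs <;> first | rfl | omega | simp_all

theorem pvRunsOf_cons (d : Char) (k : Nat) (rs : List (Char × Nat)) (x : Char)
    (t : List Char) :
    pvRunsOf d k rs (x :: t) =
      if x = d then pvRunsOf d (k + 1) rs t else pvRunsOf x 1 (rs ++ [(d, k)]) t := by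
  by_cases hx : x = d <;> simp [pvRunsOf, pvRunStep, hx]

theorem pvRuns_acc (t : List Char) (d : Char) (k : Nat) (rs : List (Char × Nat)) :
    pvRunsOf d k rs t = rs ++ pvRunsOf d k [] t := by
  induction t generalizing d k rs with
  | nil => simp [pvRunsOf]
  | cons x t ih =>
    rw [pvRunsOf_cons, pvRunsOf_cons]
    by_cases hx : x = d
    · rw [if_pos hx, if_pos hx, ih d (k + 1) rs]
    · rw [if_neg hx, if_neg hx, ih x 1 (rs ++ [(d, k)]), ih x 1 ([] ++ [(d, k)])]
      simp

-- B side: the runs fold followed by the pick fold equals the reference scan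
theorem pvB_scan (t : List Char) (d : Char) (k : Nat) (best : List Char) (hk : 1 ≤ k) :
    (pvRunsOf d k [] t).foldl pvPickStep best = pvScanRef d k (pvPickStep best (d, k)) t := by
  induction t generalizing d k best with
  | nil => simp [pvRunsOf, pvScanRef]
  | cons x t ih =>
    rw [pvRunsOf_cons]
    by_cases hx : x = d
    · rw [if_pos hx, ih d (k + 1) best (by omega)]
      simp only [pvScanRef, if_pos hx]
      rw [pvPick_upd d k best hk]
    · rw [if_neg hx, pvRuns_acc t x 1 ([] ++ [(d, k)]), List.nil_append,
        List.foldl_append]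
      simp only [List.foldl_cons, List.foldl_nil]
      rw [ih x 1 (pvPickStep best (d, k)) (by omega)]
      simp only [pvScanRef, if_neg hx]
      simp [pvPickStep]

-- A side: the index loop equals the reference scan
theorem pvStepA_pos (cs : List Char) (p1 p2 : Nat) (sub lon : List Char)
    (h : cs.getD p1 ' ' = cs.getD p2 ' ') :
    pvStepA cs (p1, sub, lon) p2 =
      (p1, PySem.List.slice cs (some (p1 : Int)) (some ((p2 : Int) + 1)),
        if lon.length < (PySem.List.slice cs (some (p1 : Int)) (some ((p2 : Int) + 1))).length
          then PySem.List.slice cs (some (p1 : Int)) (some ((p2 : Int) + 1)) else lon) := by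
  have h' : cs[p1]?.getD ' ' = cs[p2]?.getD ' ' := by simpa [List.getD] using h
  simp [pvStepA, h']

theorem pvStepA_neg (cs : List Char) (p1 p2 : Nat) (sub lon : List Char)
    (h : ¬ cs.getD p1 ' ' = cs.getD p2 ' ') :
    pvStepA cs (p1, sub, lon) p2 =
      (p2, sub, if lon.length < sub.length then sub else lon) := by
  have h' : ¬ cs[p1]?.getD ' ' = cs[p2]?.getD ' ' := by simpa [List.getD] using h
  simp [pvStepA, h']

theorem pvA_scan (cs : List Char) (m : Nat) :
    ∀ (i k : Nat) (d : Char) (sub lon : List Char),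
    cs.length = i + 1 + m → 1 ≤ k → k ≤ i + 1 →
    cs.getD (i + 1 - k) ' ' = d →
    (cs.take (i + 1)).drop (i + 1 - k) = List.replicate k d →
    sub.length ≤ lon.length →
    ((List.range' (i + 1) m).foldl (pvStepA cs) (i + 1 - k, sub, lon)).2.2 =
      pvScanRef d k lon (cs.drop (i + 1)) := by
  induction m with
  | zero =>
    intro i k d sub lon hn hk hki hd hrun hsl
    simp [List.drop_eq_nil_of_le (by omega : cs.length ≤ i + 1), pvScanRef]
  | succ m ih =>
    intro i k d sub lon hn hk hki hd hrun hsl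
    have hi1 : i + 1 < cs.length := by omega
    have hdrop : cs.drop (i + 1) = cs[i + 1] :: cs.drop (i + 2) :=
      List.drop_eq_getElem_cons hi1
    have htake : cs.take (i + 2) = cs.take (i + 1) ++ [cs[i + 1]] := by
      rw [List.take_add_one]; simp [List.getElem?_eq_getElem hi1]
    have hget1 : cs.getD (i + 1) ' ' = cs[i + 1] := List.getD_eq_getElem cs ' ' hi1
    have hrange : List.range' (i + 1) (m + 1) = (i + 1) :: List.range' (i + 1 + 1) m :=
      List.range'_succ
    rw [hrange, List.foldl_cons, hdrop]
    by_cases hx : cs[i + 1] = d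
    · -- run continues
      have hcond : cs.getD (i + 1 - k) ' ' = cs.getD (i + 1) ' ' := by rw [hd, hget1, hx]
      have hds : cs.drop (i + 1 - k) = List.replicate k d ++ cs.drop (i + 1) := by
        conv_lhs => rw [← List.take_append_drop (i + 1) cs]
        rw [List.drop_append_of_le_length (by simp; omega), hrun]
      have hsub' : PySem.List.slice cs (some ((i + 1 - k : Nat) : Int))
          (some (((i + 1 : Nat) : Int) + 1)) = List.replicate (k + 1) d := by
        rw [show (((i + 1 : Nat) : Int) + 1) = ((i + 2 : Nat) : Int) from by push_cast; ring,
          PySem.List.slice_natCast, hds, hdrop, hx,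
          show List.replicate k d ++ d :: cs.drop (i + 2) =
            List.replicate (k + 1) d ++ cs.drop (i + 2) from by simp [List.replicate_succ'],
          show i + 2 - (i + 1 - k) = k + 1 from by omega]
        exact List.take_left' (by simp)
      rw [pvStepA_pos cs (i + 1 - k) (i + 1) sub lon hcond, hsub']
      have hd2 : cs.getD (i + 1 + 1 - (k + 1)) ' ' = d := by
        rw [show i + 1 + 1 - (k + 1) = i + 1 - k from by omega]; exact hd
      have hrun2 : (cs.take (i + 1 + 1)).drop (i + 1 + 1 - (k + 1)) =
          List.replicate (k + 1) d := by
        rw [show i + 1 + 1 = i + 2 from rfl, htake,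
          show i + 1 + 1 - (k + 1) = i + 1 - k from by omega,
          List.drop_append_of_le_length (by simp; omega), hrun, hx]
        simp [List.replicate_succ']
      have hsl' : (List.replicate (k + 1) d).length ≤
          (if lon.length < (List.replicate (k + 1) d).length
            then List.replicate (k + 1) d else lon).length := by
        simp only [List.length_replicate]
        split_ifs with h
        · simp
        · simp; omega
      have hih := ih (i + 1) (k + 1) d (List.replicate (k + 1) d)
        (if lon.length < (List.replicate (k + 1) d).length then List.replicate (k + 1) d else lon)
        (by omega) (by omega) (by omega) hd2 hrun2 hsl'
      rw [show i + 1 - k = i + 1 + 1 - (k + 1) from by omega, hih]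
      simp only [pvScanRef, if_pos hx, List.length_replicate]
    · -- run resets at index i+1
      have hcond : ¬ cs.getD (i + 1 - k) ' ' = cs.getD (i + 1) ' ' := by
        rw [hd, hget1]; exact fun h => hx h.symm
      rw [pvStepA_neg cs (i + 1 - k) (i + 1) sub lon hcond,
        if_neg (by omega : ¬ lon.length < sub.length)]
      have hd2 : cs.getD (i + 1 + 1 - 1) ' ' = cs[i + 1] := by
        rw [show i + 1 + 1 - 1 = i + 1 from rfl]; exact hget1
      have hrun2 : (cs.take (i + 1 + 1)).drop (i + 1 + 1 - 1) =
          List.replicate 1 (cs[i + 1]) := by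
        rw [show i + 1 + 1 = i + 2 from rfl, htake, show i + 1 + 1 - 1 = i + 1 from rfl,
          List.drop_append_of_le_length (by simp; omega)]
        simp [List.drop_eq_nil_of_le]
      have hih := ih (i + 1) 1 (cs[i + 1]) sub lon (by omega) (by omega) (by omega)
        hd2 hrun2 hsl
      have hih' : ((List.range' (i + 1 + 1) m).foldl (pvStepA cs) (i + 1, sub, lon)).2.2 =
          pvScanRef (cs[i + 1]) 1 lon (cs.drop (i + 1 + 1)) := hih
      rw [hih']
      simp [pvScanRef, hx]

theorem find_repeated_substring_spec : Claim_equal_find_repeated_substring := by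
  intro s _
  unfold Spec_find_repeated_substring find_repeated_substring find_repeated_substring_alt
  cases hcs : s.toList with
  | nil => simp
  | cons c t =>
    cases t with
    | nil => simp
    | cons x t' =>
      simp only []
      rw [if_neg (by simp)]
      rw [if_neg (by simp)]
      have hA := pvA_scan (c :: x :: t') ((x :: t').length) 0 1 c [] []
        (by simp; omega) (by omega) (by omega) (by simp) (by simp) (by simp)
      simp only [show (0 + 1 - 1 : Nat) = 0 from rfl, show (0 + 1 : Nat) = 1 from rfl] at hA
      have hn1 : (c :: x :: t').length - 1 = (x :: t').length := by simp
      rw [hn1, hA]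
      have hB := pvB_scan (x :: t') c 1 [] (by omega)
      rw [show ((x :: t').foldl pvRunStep (c, 1, ([] : List (Char × Nat)))).2.2 ++
          [(((x :: t').foldl pvRunStep (c, 1, ([] : List (Char × Nat)))).1,
            ((x :: t').foldl pvRunStep (c, 1, ([] : List (Char × Nat)))).2.1)] =
          pvRunsOf c 1 [] (x :: t') from rfl]
      rw [hB]
      simp [pvPickStep]
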